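-- pv_equiv track=rewrite | github.com/leejongcheal/baekjoon_course_coding | 삼성기출/21하 어항 정리 23291.py | bal
-- ===== SOURCE A (Python) =====
-- import copy
--
-- def bal(LL, steps):
--     temp = copy.deepcopy(LL)
--     for i in range(len(LL)):
--         for j in range(len(LL[i])):
--             for dx, dy in steps:
--                 ni, nj = i + dx, j + dy
--                 if 0 <= ni < len(LL) and 0 <= nj < len(LL[ni]):
--                     d = abs(LL[i][j] - LL[ni][nj]) // 5
--                     if LL[i][j] < LL[ni][nj]:
--                         d = -1 * d
--                     temp[i][j] -= d
--                     temp[ni][nj] += d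
--     return temp
-- ===== SOURCE B (Python) =====
-- def _flow(a, b):
--     # amount the cell holding a sends to the cell holding b
--     d = abs(a - b) // 5
--     return -d if a < b else d
--
-- def bal(LL, steps):
--     n = len(LL)
--     out = []
--     for i in range(n):
--         row = []
--         for j in range(len(LL[i])):
--             v = LL[i][j]
--             for dx, dy in steps:
--                 ni, nj = i + dx, j + dy
--                 if 0 <= ni < n and 0 <= nj < len(LL[ni]):
--                     v -= _flow(LL[i][j], LL[ni][nj])
--                 pi, pj = i - dx, j - dy
--                 if 0 <= pi < n and 0 <= pj < len(LL[pi]):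
--                     v += _flow(LL[pi][pj], LL[i][j])
--             row.append(v)
--         out.append(row)
--     return out
-- ===== Notes on version B (the rewrite author's own statement) =====
-- stated objective: alternative
-- what changed: B builds the result grid cell-by-cell as a gather (each cell sums its own outgoing flow to forward neighbors and the incoming flow from backward source cells) instead of A's deepcopy-then-scatter of two-sided updates.
import Mathlib
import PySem

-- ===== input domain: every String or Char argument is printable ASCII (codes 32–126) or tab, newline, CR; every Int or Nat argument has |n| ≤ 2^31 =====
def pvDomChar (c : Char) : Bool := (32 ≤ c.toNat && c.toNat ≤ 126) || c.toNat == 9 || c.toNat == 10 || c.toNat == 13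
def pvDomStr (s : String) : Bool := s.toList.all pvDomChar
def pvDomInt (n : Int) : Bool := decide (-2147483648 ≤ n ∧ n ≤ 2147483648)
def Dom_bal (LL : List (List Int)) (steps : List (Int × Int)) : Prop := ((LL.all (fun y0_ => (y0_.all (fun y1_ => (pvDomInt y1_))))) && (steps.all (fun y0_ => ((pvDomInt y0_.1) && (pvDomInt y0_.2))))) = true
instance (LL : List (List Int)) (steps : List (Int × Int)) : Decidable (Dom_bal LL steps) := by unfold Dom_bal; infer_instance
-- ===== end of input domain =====

-- B rebuilds the grid cell-by-cell as a gather (outgoing + incoming flow per cell) instead of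
-- deep-copying and scattering updates; objective: alternative decomposition, same complexity.

-- grid read with defaults (all reads in both ports are in range; the default only totalizes)
def gget (t : List (List Int)) (i j : Nat) : Int := (t.getD i []).getD j 0

-- ===== PORT A =====
-- temp[j] += v within a row (no-op out of range, as the guarded Python never hits that)
def rowAdd : List Int → Nat → Int → List Int
  | [], _, _ => []
  | x :: xs, 0, v => (x + v) :: xs
  | x :: xs, n + 1, v => x :: rowAdd xs n v

def gridAdd : List (List Int) → Nat → Nat → Int → List (List Int)
  | [], _, _, _ => []
  | r :: rs, 0, j, v => rowAdd r j v :: rs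
  | r :: rs, n + 1, j, v => r :: gridAdd rs n j v

def bal (LL : List (List Int)) (steps : List (Int × Int)) : List (List Int) :=
  (List.range LL.length).foldl (fun temp (i : Nat) =>
    (List.range (LL.getD i []).length).foldl (fun temp (j : Nat) =>
      steps.foldl (fun temp (p : Int × Int) =>
        if 0 ≤ (i : Int) + p.1 ∧ (i : Int) + p.1 < (LL.length : Int) ∧ 0 ≤ (j : Int) + p.2
            ∧ (j : Int) + p.2 < ((LL.getD ((i : Int) + p.1).toNat []).length : Int) then
          let d0 := PySem.Int.floordiv |gget LL i j - gget LL ((i : Int) + p.1).toNat ((j : Int) + p.2).toNat| 5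
          let d := if gget LL i j < gget LL ((i : Int) + p.1).toNat ((j : Int) + p.2).toNat then -d0 else d0
          gridAdd (gridAdd temp i j (-d)) ((i : Int) + p.1).toNat ((j : Int) + p.2).toNat d
        else temp) temp) temp) LL

-- ===== PORT B =====
-- amount the cell holding a sends to the cell holding b
def flow (a b : Int) : Int :=
  let d := PySem.Int.floordiv |a - b| 5
  if a < b then -d else d

def bal_alt (LL : List (List Int)) (steps : List (Int × Int)) : List (List Int) :=
  (List.range LL.length).map (fun (i : Nat) =>
    (List.range (LL.getD i []).length).map (fun (j : Nat) =>
      steps.foldl (fun (v : Int) (p : Int × Int) =>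
        let v1 := if 0 ≤ (i : Int) + p.1 ∧ (i : Int) + p.1 < (LL.length : Int) ∧ 0 ≤ (j : Int) + p.2
              ∧ (j : Int) + p.2 < ((LL.getD ((i : Int) + p.1).toNat []).length : Int)
          then v - flow (gget LL i j) (gget LL ((i : Int) + p.1).toNat ((j : Int) + p.2).toNat) else v
        if 0 ≤ (i : Int) - p.1 ∧ (i : Int) - p.1 < (LL.length : Int) ∧ 0 ≤ (j : Int) - p.2
            ∧ (j : Int) - p.2 < ((LL.getD ((i : Int) - p.1).toNat []).length : Int)
          then v1 + flow (gget LL ((i : Int) - p.1).toNat ((j : Int) - p.2).toNat) (gget LL i j) else v1)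
        (gget LL i j)))

-- ===== PRECONDITION & SPEC =====
def Spec_bal (LL : List (List Int)) (steps : List (Int × Int)) (out : List (List Int)) : Prop := out = bal_alt LL steps
instance (LL : List (List Int)) (steps : List (Int × Int)) (out : List (List Int)) : Decidable (Spec_bal LL steps out) := by unfold Spec_bal; infer_instance

-- ===== CLAIM (what is proved, stated in full; the proofs are below) =====
def Claim_equal_bal : Prop := ∀ (LL : List (List Int)) (steps : List (Int × Int)), Dom_bal LL steps → Spec_bal LL steps (bal LL steps)

-- ===== LEMMAS AND PROOFS =====

-- one scatter operation of A, on cell (op.1, op.2.1) with step (op.2.2.1, op.2.2.2)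
def applyOp (LL : List (List Int)) (t : List (List Int)) (op : Nat × Nat × Int × Int) : List (List Int) :=
  if 0 ≤ (op.1 : Int) + op.2.2.1 ∧ (op.1 : Int) + op.2.2.1 < (LL.length : Int) ∧ 0 ≤ (op.2.1 : Int) + op.2.2.2
      ∧ (op.2.1 : Int) + op.2.2.2 < ((LL.getD ((op.1 : Int) + op.2.2.1).toNat []).length : Int) then
    gridAdd (gridAdd t op.1 op.2.1
        (-(flow (gget LL op.1 op.2.1) (gget LL ((op.1 : Int) + op.2.2.1).toNat ((op.2.1 : Int) + op.2.2.2).toNat))))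
      ((op.1 : Int) + op.2.2.1).toNat ((op.2.1 : Int) + op.2.2.2).toNat
      (flow (gget LL op.1 op.2.1) (gget LL ((op.1 : Int) + op.2.2.1).toNat ((op.2.1 : Int) + op.2.2.2).toNat))
  else t

def opsL (LL : List (List Int)) (steps : List (Int × Int)) : List (Nat × Nat × Int × Int) :=
  (List.range LL.length).flatMap (fun (a : Nat) =>
    (List.range ((LL.getD a []).length)).flatMap (fun (b : Nat) =>
      steps.map (fun (p : Int × Int) => (a, b, p.1, p.2))))

-- what operation op contributes to cell (i,j)
def contrib (LL : List (List Int)) (i j : Nat) (op : Nat × Nat × Int × Int) : Int :=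
  if 0 ≤ (op.1 : Int) + op.2.2.1 ∧ (op.1 : Int) + op.2.2.1 < (LL.length : Int) ∧ 0 ≤ (op.2.1 : Int) + op.2.2.2
      ∧ (op.2.1 : Int) + op.2.2.2 < ((LL.getD ((op.1 : Int) + op.2.2.1).toNat []).length : Int) then
    (if i = op.1 ∧ j = op.2.1 ∧ op.2.1 < (LL.getD op.1 []).length
      then -(flow (gget LL op.1 op.2.1) (gget LL ((op.1 : Int) + op.2.2.1).toNat ((op.2.1 : Int) + op.2.2.2).toNat)) else 0)
    + (if i = ((op.1 : Int) + op.2.2.1).toNat ∧ j = ((op.2.1 : Int) + op.2.2.2).toNat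
      then flow (gget LL op.1 op.2.1) (gget LL ((op.1 : Int) + op.2.2.1).toNat ((op.2.1 : Int) + op.2.2.2).toNat) else 0)
  else 0

-- per-step delta of B at cell (i,j)
def percell (LL : List (List Int)) (i j : Nat) (p : Int × Int) : Int :=
  (if 0 ≤ (i : Int) + p.1 ∧ (i : Int) + p.1 < (LL.length : Int) ∧ 0 ≤ (j : Int) + p.2
      ∧ (j : Int) + p.2 < ((LL.getD ((i : Int) + p.1).toNat []).length : Int)
    then -(flow (gget LL i j) (gget LL ((i : Int) + p.1).toNat ((j : Int) + p.2).toNat)) else 0)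
  + (if 0 ≤ (i : Int) - p.1 ∧ (i : Int) - p.1 < (LL.length : Int) ∧ 0 ≤ (j : Int) - p.2
      ∧ (j : Int) - p.2 < ((LL.getD ((i : Int) - p.1).toNat []).length : Int)
    then flow (gget LL ((i : Int) - p.1).toNat ((j : Int) - p.2).toNat) (gget LL i j) else 0)

lemma rowAdd_length (r : List Int) (j : Nat) (v : Int) : (rowAdd r j v).length = r.length := by
  induction r generalizing j with
  | nil => rfl
  | cons x xs ih => cases j <;> simp [rowAdd, ih]

lemma rowAdd_getD (r : List Int) (j : Nat) (v : Int) (k : Nat) :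
    (rowAdd r j v).getD k 0 = r.getD k 0 + (if k = j ∧ j < r.length then v else 0) := by
  induction r generalizing j k with
  | nil => simp [rowAdd]
  | cons x xs ih =>
    cases j with
    | zero => cases k <;> simp [rowAdd]
    | succ m =>
      cases k with
      | zero => simp [rowAdd]
      | succ k' =>
        simp only [rowAdd, List.getD_cons_succ, List.length_cons, ih]
        congr 1
        split_ifs <;> first | rfl | omega

lemma gridAdd_getD (t : List (List Int)) (a j : Nat) (v : Int) (k : Nat) :
    (gridAdd t a j v).getD k [] = if k = a then rowAdd (t.getD a []) j v else t.getD k [] := by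
  induction t generalizing a k with
  | nil =>
    simp only [gridAdd, List.getD_nil]
    split
    · cases j <;> rfl
    · rfl
  | cons r rs ih =>
    cases a with
    | zero => cases k <;> simp [gridAdd]
    | succ m =>
      cases k with
      | zero => simp [gridAdd]
      | succ k' =>
        simp only [gridAdd, List.getD_cons_succ, ih]
        split_ifs <;> first | rfl | omega

lemma gridAdd_length (t : List (List Int)) (a j : Nat) (v : Int) :
    (gridAdd t a j v).length = t.length := by
  induction t generalizing a with
  | nil => rfl
  | cons r rs ih => cases a <;> simp [gridAdd, ih]

lemma gridAdd_rlen (t : List (List Int)) (a j : Nat) (v : Int) (k : Nat) :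
    ((gridAdd t a j v).getD k []).length = (t.getD k []).length := by
  rw [gridAdd_getD]
  split
  · rename_i h; subst h; rw [rowAdd_length]
  · rfl

lemma gget_gridAdd (t : List (List Int)) (a b : Nat) (v : Int) (i j : Nat) :
    gget (gridAdd t a b v) i j
      = gget t i j + (if i = a ∧ j = b ∧ b < (t.getD a []).length then v else 0) := by
  unfold gget
  rw [gridAdd_getD]
  by_cases h : i = a
  · subst h; rw [if_pos rfl, rowAdd_getD]
    by_cases hj : j = b ∧ b < (t.getD i []).length
    · rw [if_pos hj, if_pos ⟨rfl, hj⟩]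
    · rw [if_neg hj, if_neg (by tauto)]
  · rw [if_neg h, if_neg (by tauto), add_zero]

lemma applyOp_length (LL t : List (List Int)) (op : Nat × Nat × Int × Int) :
    (applyOp LL t op).length = t.length := by
  unfold applyOp
  split <;> simp [gridAdd_length]

lemma applyOp_rlen (LL t : List (List Int)) (op : Nat × Nat × Int × Int) (k : Nat) :
    ((applyOp LL t op).getD k []).length = (t.getD k []).length := by
  unfold applyOp
  split
  · rw [gridAdd_rlen, gridAdd_rlen]
  · rfl

lemma gget_applyOp (LL t : List (List Int))
    (ht : ∀ k, (t.getD k []).length = (LL.getD k []).length)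
    (op : Nat × Nat × Int × Int) (i j : Nat) :
    gget (applyOp LL t op) i j = gget t i j + contrib LL i j op := by
  unfold applyOp contrib
  split
  case isTrue h =>
    rw [gget_gridAdd, gget_gridAdd, gridAdd_rlen, ht op.1, ht]
    have hiff : (i = ((op.1 : Int) + op.2.2.1).toNat ∧ j = ((op.2.1 : Int) + op.2.2.2).toNat
          ∧ ((op.2.1 : Int) + op.2.2.2).toNat < (LL.getD ((op.1 : Int) + op.2.2.1).toNat []).length)
        ↔ (i = ((op.1 : Int) + op.2.2.1).toNat ∧ j = ((op.2.1 : Int) + op.2.2.2).toNat) :=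
      ⟨fun hc => ⟨hc.1, hc.2.1⟩, fun hc => ⟨hc.1, hc.2, by omega⟩⟩
    rw [if_congr hiff rfl rfl]
    ring
  case isFalse h => simp

lemma foldl_flatMap_eq {α β γ : Type} (g : α → List β) (f : γ → β → γ) (l : List α) (init : γ) :
    (l.flatMap g).foldl f init = l.foldl (fun acc x => (g x).foldl f acc) init := by
  induction l generalizing init with
  | nil => rfl
  | cons x xs ih => simp [List.flatMap_cons, List.foldl_append, ih]

lemma foldl_ext {α β : Type} (f g : β → α → β) (h : ∀ b a, f b a = g b a) :
    ∀ (l : List α) (init : β), l.foldl f init = l.foldl g init := by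
  intro l
  induction l with
  | nil => intro init; rfl
  | cons x xs ih => intro init; simp only [List.foldl_cons, h, ih]

lemma bal_eq (LL : List (List Int)) (steps : List (Int × Int)) :
    bal LL steps = (opsL LL steps).foldl (applyOp LL) LL := by
  unfold bal opsL
  rw [foldl_flatMap_eq]
  apply foldl_ext
  intro temp a
  rw [foldl_flatMap_eq]
  apply foldl_ext
  intro temp2 b
  rw [List.foldl_map]
  apply foldl_ext
  intro temp3 p
  rfl

lemma gget_foldl (LL : List (List Int)) (i j : Nat) (ops : List (Nat × Nat × Int × Int)) :
    ∀ t, (∀ k, (t.getD k []).length = (LL.getD k []).length) →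
      gget (ops.foldl (applyOp LL) t) i j = gget t i j + (ops.map (contrib LL i j)).sum := by
  induction ops with
  | nil => intro t _; simp
  | cons op rest ih =>
    intro t ht
    simp only [List.foldl_cons, List.map_cons, List.sum_cons]
    rw [ih _ (fun k => by rw [applyOp_rlen, ht]), gget_applyOp LL t ht]
    ring

lemma foldl_rlen (LL : List (List Int)) (ops : List (Nat × Nat × Int × Int)) :
    ∀ t k, ((ops.foldl (applyOp LL) t).getD k []).length = (t.getD k []).length := by
  induction ops with
  | nil => intro t k; rfl
  | cons op rest ih => intro t k; simp only [List.foldl_cons]; rw [ih, applyOp_rlen]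

lemma foldl_length (LL : List (List Int)) (ops : List (Nat × Nat × Int × Int)) :
    ∀ t, ((ops.foldl (applyOp LL) t)).length = t.length := by
  induction ops with
  | nil => intro t; rfl
  | cons op rest ih => intro t; simp only [List.foldl_cons]; rw [ih, applyOp_length]

lemma sum_map_zero {α : Type} (l : List α) : (l.map (fun _ => (0 : Int))).sum = 0 := by
  induction l <;> simp [*]

lemma sum_map_add {α : Type} (l : List α) (f g : α → Int) :
    (l.map (fun x => f x + g x)).sum = (l.map f).sum + (l.map g).sum := by
  induction l with
  | nil => simp
  | cons x xs ih =>
    simp only [List.map_cons, List.sum_cons, ih]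
    ring

lemma sum_map_swap {α β : Type} (l₁ : List α) (l₂ : List β) (f : α → β → Int) :
    (l₁.map (fun a => (l₂.map (f a)).sum)).sum = (l₂.map (fun b => (l₁.map (fun a => f a b)).sum)).sum := by
  induction l₁ with
  | nil => simp
  | cons x xs ih => simp only [List.map_cons, List.sum_cons, ih, ← sum_map_add]

lemma sum_range_ite (n a0 : Nat) (f : Nat → Int) :
    ((List.range n).map (fun (a : Nat) => if a = a0 then f a else 0)).sum = if a0 < n then f a0 else 0 := by
  induction n with
  | zero => simp
  | succ m ih =>
    rw [List.range_succ, List.map_append, List.sum_append, ih]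
    simp only [List.map_cons, List.map_nil, List.sum_cons, List.sum_nil]
    by_cases h1 : a0 < m
    · rw [if_pos h1, if_neg (by omega : ¬ m = a0), if_pos (by omega)]; ring
    · by_cases h2 : a0 = m
      · subst h2; rw [if_neg h1, if_pos rfl, if_pos (by omega)]; ring
      · rw [if_neg h1, if_neg (by omega : ¬ m = a0), if_neg (by omega)]; ring

lemma sum_map_flatMap {α β : Type} (l : List α) (g : α → List β) (f : β → Int) :
    ((l.flatMap g).map f).sum = (l.map (fun x => ((g x).map f).sum)).sum := by
  induction l with
  | nil => rfl
  | cons x xs ih => simp [List.flatMap_cons, ih]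

lemma getD_map_range {α : Type} (f : Nat → α) (d : α) (n k : Nat) :
    ((List.range n).map f).getD k d = if k < n then f k else d := by
  by_cases h : k < n
  · rw [List.getD_eq_getElem _ _ (by simpa using h), if_pos h]
    simp
  · rw [List.getD_eq_default _ _ (by simpa using Nat.le_of_not_lt h), if_neg h]

-- outgoing half of the contribution sum collapses to the forward term of percell
lemma outgoing_sum (LL : List (List Int)) (i j : Nat) (p : Int × Int)
    (hi : i < LL.length) (hj : j < (LL.getD i []).length) :
    ((List.range LL.length).map (fun (a : Nat) =>
      (((List.range ((LL.getD a []).length)).map (fun (b : Nat) =>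
        (if 0 ≤ (a : Int) + p.1 ∧ (a : Int) + p.1 < (LL.length : Int) ∧ 0 ≤ (b : Int) + p.2
            ∧ (b : Int) + p.2 < ((LL.getD ((a : Int) + p.1).toNat []).length : Int)
          then (if i = a ∧ j = b ∧ b < (LL.getD a []).length
            then -(flow (gget LL a b) (gget LL ((a : Int) + p.1).toNat ((b : Int) + p.2).toNat)) else 0)
          else 0))).sum))).sum
    = (if 0 ≤ (i : Int) + p.1 ∧ (i : Int) + p.1 < (LL.length : Int) ∧ 0 ≤ (j : Int) + p.2
        ∧ (j : Int) + p.2 < ((LL.getD ((i : Int) + p.1).toNat []).length : Int)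
      then -(flow (gget LL i j) (gget LL ((i : Int) + p.1).toNat ((j : Int) + p.2).toNat)) else 0) := by
  have hrow : ∀ a ∈ List.range LL.length, (((List.range ((LL.getD a []).length)).map (fun (b : Nat) =>
        (if 0 ≤ (a : Int) + p.1 ∧ (a : Int) + p.1 < (LL.length : Int) ∧ 0 ≤ (b : Int) + p.2
            ∧ (b : Int) + p.2 < ((LL.getD ((a : Int) + p.1).toNat []).length : Int)
          then (if i = a ∧ j = b ∧ b < (LL.getD a []).length
            then -(flow (gget LL a b) (gget LL ((a : Int) + p.1).toNat ((b : Int) + p.2).toNat)) else 0)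
          else 0))).sum)
      = (fun (a : Nat) => if a = i
          then (if 0 ≤ (i : Int) + p.1 ∧ (i : Int) + p.1 < (LL.length : Int) ∧ 0 ≤ (j : Int) + p.2
              ∧ (j : Int) + p.2 < ((LL.getD ((i : Int) + p.1).toNat []).length : Int)
            then -(flow (gget LL i j) (gget LL ((i : Int) + p.1).toNat ((j : Int) + p.2).toNat)) else 0)
          else 0) a := by
    intro a _
    beta_reduce
    by_cases ha : a = i
    · subst ha
      rw [if_pos rfl]
      have hfn : ∀ b ∈ List.range ((LL.getD a []).length),
          (if 0 ≤ (a : Int) + p.1 ∧ (a : Int) + p.1 < (LL.length : Int) ∧ 0 ≤ (b : Int) + p.2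
              ∧ (b : Int) + p.2 < ((LL.getD ((a : Int) + p.1).toNat []).length : Int)
            then (if a = a ∧ j = b ∧ b < (LL.getD a []).length
              then -(flow (gget LL a b) (gget LL ((a : Int) + p.1).toNat ((b : Int) + p.2).toNat)) else 0)
            else 0)
          = (fun (b : Nat) => if b = j
            then (if 0 ≤ (a : Int) + p.1 ∧ (a : Int) + p.1 < (LL.length : Int) ∧ 0 ≤ (j : Int) + p.2
                ∧ (j : Int) + p.2 < ((LL.getD ((a : Int) + p.1).toNat []).length : Int)
              then -(flow (gget LL a j) (gget LL ((a : Int) + p.1).toNat ((j : Int) + p.2).toNat)) else 0)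
            else 0) b := by
        intro b _
        beta_reduce
        by_cases hb : b = j
        · subst hb; split_ifs <;> tauto
        · rw [if_neg hb]; split_ifs <;> tauto
      rw [List.map_congr_left hfn, sum_range_ite, if_pos hj]
    · rw [if_neg ha]
      have hfn : ∀ b ∈ List.range ((LL.getD a []).length),
          (if 0 ≤ (a : Int) + p.1 ∧ (a : Int) + p.1 < (LL.length : Int) ∧ 0 ≤ (b : Int) + p.2
              ∧ (b : Int) + p.2 < ((LL.getD ((a : Int) + p.1).toNat []).length : Int)
            then (if i = a ∧ j = b ∧ b < (LL.getD a []).length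
              then -(flow (gget LL a b) (gget LL ((a : Int) + p.1).toNat ((b : Int) + p.2).toNat)) else 0)
            else 0) = (fun (_ : Nat) => (0 : Int)) b := by
        intro b _
        beta_reduce
        split_ifs <;> first | rfl | (exfalso; tauto)
      rw [List.map_congr_left hfn, sum_map_zero]
  rw [List.map_congr_left hrow, sum_range_ite, if_pos hi]

-- incoming half collapses to the backward term of percell
lemma incoming_sum (LL : List (List Int)) (i j : Nat) (p : Int × Int)
    (hi : i < LL.length) (hj : j < (LL.getD i []).length) :
    ((List.range LL.length).map (fun (a : Nat) =>
      (((List.range ((LL.getD a []).length)).map (fun (b : Nat) =>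
        (if 0 ≤ (a : Int) + p.1 ∧ (a : Int) + p.1 < (LL.length : Int) ∧ 0 ≤ (b : Int) + p.2
            ∧ (b : Int) + p.2 < ((LL.getD ((a : Int) + p.1).toNat []).length : Int)
          then (if i = ((a : Int) + p.1).toNat ∧ j = ((b : Int) + p.2).toNat
            then flow (gget LL a b) (gget LL ((a : Int) + p.1).toNat ((b : Int) + p.2).toNat) else 0)
          else 0))).sum))).sum
    = (if 0 ≤ (i : Int) - p.1 ∧ (i : Int) - p.1 < (LL.length : Int) ∧ 0 ≤ (j : Int) - p.2
        ∧ (j : Int) - p.2 < ((LL.getD ((i : Int) - p.1).toNat []).length : Int)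
      then flow (gget LL ((i : Int) - p.1).toNat ((j : Int) - p.2).toNat) (gget LL i j) else 0) := by
  have key : ∀ (a b : Nat),
      (if 0 ≤ (a : Int) + p.1 ∧ (a : Int) + p.1 < (LL.length : Int) ∧ 0 ≤ (b : Int) + p.2
          ∧ (b : Int) + p.2 < ((LL.getD ((a : Int) + p.1).toNat []).length : Int)
        then (if i = ((a : Int) + p.1).toNat ∧ j = ((b : Int) + p.2).toNat
          then flow (gget LL a b) (gget LL ((a : Int) + p.1).toNat ((b : Int) + p.2).toNat) else 0)
        else 0)
      = (if a = ((i : Int) - p.1).toNat ∧ 0 ≤ (i : Int) - p.1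
          then (if b = ((j : Int) - p.2).toNat ∧ 0 ≤ (j : Int) - p.2
            then flow (gget LL ((i : Int) - p.1).toNat ((j : Int) - p.2).toNat) (gget LL i j) else 0)
          else 0) := by
    intro a b
    by_cases hg : 0 ≤ (a : Int) + p.1 ∧ (a : Int) + p.1 < (LL.length : Int) ∧ 0 ≤ (b : Int) + p.2
        ∧ (b : Int) + p.2 < ((LL.getD ((a : Int) + p.1).toNat []).length : Int)
    · rw [if_pos hg]
      by_cases hm : i = ((a : Int) + p.1).toNat ∧ j = ((b : Int) + p.2).toNat
      · rw [if_pos hm]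
        have ha : a = ((i : Int) - p.1).toNat ∧ 0 ≤ (i : Int) - p.1 := by omega
        have hb : b = ((j : Int) - p.2).toNat ∧ 0 ≤ (j : Int) - p.2 := by omega
        rw [if_pos ha, if_pos hb]
        have e1 : ((a : Int) + p.1).toNat = i := hm.1.symm
        have e2 : ((b : Int) + p.2).toNat = j := hm.2.symm
        rw [e1, e2, ha.1, hb.1]
      · rw [if_neg hm]
        by_cases ha : a = ((i : Int) - p.1).toNat ∧ 0 ≤ (i : Int) - p.1
        · by_cases hb : b = ((j : Int) - p.2).toNat ∧ 0 ≤ (j : Int) - p.2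
          · exfalso; apply hm; omega
          · rw [if_pos ha, if_neg hb]
        · rw [if_neg ha]
    · rw [if_neg hg]
      by_cases ha : a = ((i : Int) - p.1).toNat ∧ 0 ≤ (i : Int) - p.1
      · by_cases hb : b = ((j : Int) - p.2).toNat ∧ 0 ≤ (j : Int) - p.2
        · exfalso
          apply hg
          have e1 : (a : Int) + p.1 = (i : Int) := by omega
          have e2 : (b : Int) + p.2 = (j : Int) := by omega
          rw [e1, e2]
          refine ⟨by omega, by omega, by omega, ?_⟩
          rw [show ((i : Int)).toNat = i from by omega]
          exact_mod_cast hj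
        · rw [if_pos ha, if_neg hb]
      · rw [if_neg ha]
  have keyrow : ∀ a ∈ List.range LL.length, (((List.range ((LL.getD a []).length)).map (fun (b : Nat) =>
        (if 0 ≤ (a : Int) + p.1 ∧ (a : Int) + p.1 < (LL.length : Int) ∧ 0 ≤ (b : Int) + p.2
            ∧ (b : Int) + p.2 < ((LL.getD ((a : Int) + p.1).toNat []).length : Int)
          then (if i = ((a : Int) + p.1).toNat ∧ j = ((b : Int) + p.2).toNat
            then flow (gget LL a b) (gget LL ((a : Int) + p.1).toNat ((b : Int) + p.2).toNat) else 0)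
          else 0))).sum)
      = (fun (a : Nat) => if a = ((i : Int) - p.1).toNat
          then (if (0 ≤ (i : Int) - p.1 ∧ 0 ≤ (j : Int) - p.2) ∧ ((j : Int) - p.2).toNat < (LL.getD ((i : Int) - p.1).toNat []).length
            then flow (gget LL ((i : Int) - p.1).toNat ((j : Int) - p.2).toNat) (gget LL i j) else 0)
          else 0) a := by
    intro a _
    beta_reduce
    rw [List.map_congr_left (fun b _ => key a b)]
    by_cases ha : a = ((i : Int) - p.1).toNat
    · rw [if_pos ha]
      by_cases hpi : 0 ≤ (i : Int) - p.1
      · have hfn : ∀ b ∈ List.range ((LL.getD a []).length),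
            (if a = ((i : Int) - p.1).toNat ∧ 0 ≤ (i : Int) - p.1
              then (if b = ((j : Int) - p.2).toNat ∧ 0 ≤ (j : Int) - p.2
                then flow (gget LL ((i : Int) - p.1).toNat ((j : Int) - p.2).toNat) (gget LL i j) else 0)
              else 0)
            = (fun (b : Nat) => if b = ((j : Int) - p.2).toNat
              then (if 0 ≤ (j : Int) - p.2
                then flow (gget LL ((i : Int) - p.1).toNat ((j : Int) - p.2).toNat) (gget LL i j) else 0)
              else 0) b := by
          intro b _
          beta_reduce
          by_cases hb : b = ((j : Int) - p.2).toNat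
          · subst hb; split_ifs <;> tauto
          · rw [if_neg hb]; split_ifs <;> tauto
        rw [List.map_congr_left hfn, sum_range_ite]
        subst ha
        split_ifs <;> first | rfl | tauto
      · have hfn : ∀ b ∈ List.range ((LL.getD a []).length),
            (if a = ((i : Int) - p.1).toNat ∧ 0 ≤ (i : Int) - p.1
              then (if b = ((j : Int) - p.2).toNat ∧ 0 ≤ (j : Int) - p.2
                then flow (gget LL ((i : Int) - p.1).toNat ((j : Int) - p.2).toNat) (gget LL i j) else 0)
              else 0) = (fun (_ : Nat) => (0 : Int)) b := by
          intro b _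
          beta_reduce
          split_ifs <;> tauto
        rw [List.map_congr_left hfn, sum_map_zero]
        split_ifs <;> first | rfl | tauto
    · rw [if_neg ha]
      have hfn : ∀ b ∈ List.range ((LL.getD a []).length),
          (if a = ((i : Int) - p.1).toNat ∧ 0 ≤ (i : Int) - p.1
            then (if b = ((j : Int) - p.2).toNat ∧ 0 ≤ (j : Int) - p.2
              then flow (gget LL ((i : Int) - p.1).toNat ((j : Int) - p.2).toNat) (gget LL i j) else 0)
            else 0) = (fun (_ : Nat) => (0 : Int)) b := by
        intro b _
        beta_reduce
        split_ifs <;> tauto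
      rw [List.map_congr_left hfn, sum_map_zero]
  rw [List.map_congr_left keyrow, sum_range_ite]
  split_ifs <;> first | rfl | omega

lemma regroup (LL : List (List Int)) (steps : List (Int × Int)) (i j : Nat)
    (hi : i < LL.length) (hj : j < (LL.getD i []).length) :
    ((opsL LL steps).map (contrib LL i j)).sum = (steps.map (percell LL i j)).sum := by
  unfold opsL
  rw [sum_map_flatMap]
  have step1 : ∀ a ∈ List.range LL.length, (((List.range ((LL.getD a []).length)).flatMap (fun (b : Nat) =>
        steps.map (fun (p : Int × Int) => (a, b, p.1, p.2)))).map (contrib LL i j)).sum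
      = (fun (a : Nat) => (steps.map (fun (p : Int × Int) => ((List.range ((LL.getD a []).length)).map (fun (b : Nat) =>
        contrib LL i j (a, b, p.1, p.2))).sum)).sum) a := by
    intro a _
    beta_reduce
    rw [sum_map_flatMap]
    rw [List.map_congr_left (fun (b : Nat) _ => by rw [List.map_map]; rfl :
      ∀ b ∈ List.range ((LL.getD a []).length),
        ((steps.map (fun (p : Int × Int) => (a, b, p.1, p.2))).map (contrib LL i j)).sum
        = (fun (b : Nat) => (steps.map (fun (p : Int × Int) => contrib LL i j (a, b, p.1, p.2))).sum) b)]
    exact sum_map_swap _ _ _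
  rw [List.map_congr_left step1, sum_map_swap]
  refine congrArg List.sum (List.map_congr_left ?_)
  intro p _
  have expand : ∀ (a b : Nat), contrib LL i j (a, b, p.1, p.2)
      = (fun (b : Nat) => (if 0 ≤ (a : Int) + p.1 ∧ (a : Int) + p.1 < (LL.length : Int) ∧ 0 ≤ (b : Int) + p.2
            ∧ (b : Int) + p.2 < ((LL.getD ((a : Int) + p.1).toNat []).length : Int)
          then (if i = a ∧ j = b ∧ b < (LL.getD a []).length
            then -(flow (gget LL a b) (gget LL ((a : Int) + p.1).toNat ((b : Int) + p.2).toNat)) else 0)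
          else 0)
        + (if 0 ≤ (a : Int) + p.1 ∧ (a : Int) + p.1 < (LL.length : Int) ∧ 0 ≤ (b : Int) + p.2
            ∧ (b : Int) + p.2 < ((LL.getD ((a : Int) + p.1).toNat []).length : Int)
          then (if i = ((a : Int) + p.1).toNat ∧ j = ((b : Int) + p.2).toNat
            then flow (gget LL a b) (gget LL ((a : Int) + p.1).toNat ((b : Int) + p.2).toNat) else 0)
          else 0)) b := by
    intro a b
    simp only [contrib]
    split_ifs <;> simp
  have inner : ∀ a ∈ List.range LL.length, ((List.range ((LL.getD a []).length)).map (fun (b : Nat) =>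
        contrib LL i j (a, b, p.1, p.2))).sum
      = (fun (a : Nat) =>
        ((List.range ((LL.getD a []).length)).map (fun (b : Nat) =>
          (if 0 ≤ (a : Int) + p.1 ∧ (a : Int) + p.1 < (LL.length : Int) ∧ 0 ≤ (b : Int) + p.2
              ∧ (b : Int) + p.2 < ((LL.getD ((a : Int) + p.1).toNat []).length : Int)
            then (if i = a ∧ j = b ∧ b < (LL.getD a []).length
              then -(flow (gget LL a b) (gget LL ((a : Int) + p.1).toNat ((b : Int) + p.2).toNat)) else 0)
            else 0))).sum
        + ((List.range ((LL.getD a []).length)).map (fun (b : Nat) =>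
          (if 0 ≤ (a : Int) + p.1 ∧ (a : Int) + p.1 < (LL.length : Int) ∧ 0 ≤ (b : Int) + p.2
              ∧ (b : Int) + p.2 < ((LL.getD ((a : Int) + p.1).toNat []).length : Int)
            then (if i = ((a : Int) + p.1).toNat ∧ j = ((b : Int) + p.2).toNat
              then flow (gget LL a b) (gget LL ((a : Int) + p.1).toNat ((b : Int) + p.2).toNat) else 0)
            else 0))).sum) a := by
    intro a _
    beta_reduce
    rw [List.map_congr_left (fun b _ => expand a b), sum_map_add]
  rw [List.map_congr_left inner, sum_map_add, outgoing_sum LL i j p hi hj,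
    incoming_sum LL i j p hi hj]
  rfl

-- B's per-cell fold over steps is the start value plus the sum of per-step deltas
lemma alt_fold (LL : List (List Int)) (i j : Nat) (steps : List (Int × Int)) :
    ∀ v : Int, steps.foldl (fun (v : Int) (p : Int × Int) =>
        let v1 := if 0 ≤ (i : Int) + p.1 ∧ (i : Int) + p.1 < (LL.length : Int) ∧ 0 ≤ (j : Int) + p.2
              ∧ (j : Int) + p.2 < ((LL.getD ((i : Int) + p.1).toNat []).length : Int)
          then v - flow (gget LL i j) (gget LL ((i : Int) + p.1).toNat ((j : Int) + p.2).toNat) else v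
        if 0 ≤ (i : Int) - p.1 ∧ (i : Int) - p.1 < (LL.length : Int) ∧ 0 ≤ (j : Int) - p.2
            ∧ (j : Int) - p.2 < ((LL.getD ((i : Int) - p.1).toNat []).length : Int)
          then v1 + flow (gget LL ((i : Int) - p.1).toNat ((j : Int) - p.2).toNat) (gget LL i j) else v1) v
      = v + (steps.map (percell LL i j)).sum := by
  induction steps with
  | nil => intro v; simp
  | cons p rest ih =>
    intro v
    rw [List.foldl_cons, ih, List.map_cons, List.sum_cons]
    simp only [percell]
    split_ifs <;> ring

lemma bal_entry (LL : List (List Int)) (steps : List (Int × Int)) (i j : Nat) :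
    gget (bal LL steps) i j = gget LL i j + ((opsL LL steps).map (contrib LL i j)).sum := by
  rw [bal_eq]
  exact gget_foldl LL i j (opsL LL steps) LL (fun _ => rfl)

lemma bal_length (LL : List (List Int)) (steps : List (Int × Int)) :
    (bal LL steps).length = LL.length := by
  rw [bal_eq]; exact foldl_length LL _ LL

lemma bal_rlen (LL : List (List Int)) (steps : List (Int × Int)) (k : Nat) :
    ((bal LL steps).getD k []).length = (LL.getD k []).length := by
  rw [bal_eq]; exact foldl_rlen LL _ LL k

lemma row_ext (r s : List Int) (hlen : r.length = s.length)
    (h : ∀ j : Nat, r.getD j 0 = s.getD j 0) : r = s := by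
  induction r generalizing s with
  | nil => cases s with
    | nil => rfl
    | cons y ys => simp at hlen
  | cons x xs ih =>
    cases s with
    | nil => simp at hlen
    | cons y ys =>
      have h0 := h 0
      simp only [List.getD_cons_zero] at h0
      subst h0
      have := ih ys (by simpa using hlen) (fun j => by simpa using h (j + 1))
      rw [this]

lemma grid_ext (A B : List (List Int)) (hlen : A.length = B.length)
    (hrl : ∀ k : Nat, (A.getD k []).length = (B.getD k []).length)
    (h : ∀ i j : Nat, gget A i j = gget B i j) : A = B := by
  induction A generalizing B with
  | nil => cases B with
    | nil => rfl
    | cons y ys => simp at hlen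
  | cons x xs ih =>
    cases B with
    | nil => simp at hlen
    | cons y ys =>
      have hx : x = y := row_ext x y (by simpa using hrl 0) (fun j => by
        have := h 0 j
        simpa [gget] using this)
      subst hx
      have := ih ys (by simpa using hlen) (fun k => by simpa using hrl (k + 1))
        (fun i j => by
          have := h (i + 1) j
          simpa [gget] using this)
      rw [this]

lemma bal_alt_rlen (LL : List (List Int)) (steps : List (Int × Int)) (k : Nat) :
    ((bal_alt LL steps).getD k []).length = (LL.getD k []).length := by
  unfold bal_alt
  rw [getD_map_range]
  by_cases h : k < LL.length
  · rw [if_pos h]; simp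
  · rw [if_neg h]
    have : LL.getD k [] = [] := List.getD_eq_default _ _ (Nat.le_of_not_lt h)
    rw [this]

lemma gget_bal_alt (LL : List (List Int)) (steps : List (Int × Int)) (i j : Nat) :
    gget (bal_alt LL steps) i j
      = if i < LL.length ∧ j < (LL.getD i []).length
        then gget LL i j + (steps.map (percell LL i j)).sum
        else gget LL i j := by
  rw [show gget (bal_alt LL steps) i j = ((bal_alt LL steps).getD i []).getD j 0 from rfl]
  unfold bal_alt
  rw [getD_map_range]
  by_cases hi : i < LL.length
  · rw [if_pos hi]
    rw [getD_map_range]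
    by_cases hj : j < (LL.getD i []).length
    · rw [if_pos hj, if_pos ⟨hi, hj⟩]
      exact alt_fold LL i j steps (gget LL i j)
    · rw [if_neg hj, if_neg (by tauto)]
      rw [show gget LL i j = (LL.getD i []).getD j 0 from rfl,
        List.getD_eq_default _ _ (Nat.le_of_not_lt hj)]
  · rw [if_neg hi, if_neg (by tauto)]
    rw [show gget LL i j = (LL.getD i []).getD j 0 from rfl,
      List.getD_eq_default (d := ([] : List Int)) _ (Nat.le_of_not_lt hi)]

-- ===== VERDICT (by name: the statement is the Claim_ definition above) =====
theorem bal_spec : Claim_equal_bal := by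
  intro LL steps _dom
  unfold Spec_bal
  apply grid_ext
  · rw [bal_length]
    unfold bal_alt
    simp
  · intro k
    rw [bal_rlen, bal_alt_rlen]
  · intro i j
    rw [bal_entry, gget_bal_alt]
    by_cases h : i < LL.length ∧ j < (LL.getD i []).length
    · rw [if_pos h, regroup LL steps i j h.1 h.2]
    · rw [if_neg h]
      -- out-of-range cell: no operation contributes to it
      have hz : ∀ op ∈ opsL LL steps, contrib LL i j op = (fun (_ : Nat × Nat × Int × Int) => (0 : Int)) op := by
        intro op hop
        unfold opsL at hop
        simp only [List.mem_flatMap, List.mem_map, List.mem_range] at hop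
        obtain ⟨a, ha, b, hb, q, _, rfl⟩ := hop
        simp only [contrib]
        split_ifs with hg h1 h2 h3
        · exfalso
          obtain ⟨e1, e2, e3⟩ := h1
          subst e1; subst e2
          exact h ⟨ha, e3⟩
        · exfalso
          obtain ⟨e1, e2, e3⟩ := h1
          subst e1; subst e2
          exact h ⟨ha, e3⟩
        · exfalso
          obtain ⟨e1, e2⟩ := h3
          subst e1; subst e2
          exact h ⟨by omega, by omega⟩
        · simp
        · rfl
      rw [List.map_congr_left hz, sum_map_zero, add_zero]
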